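-- pv_equiv track=rewrite | github.com/zourunxin/2020-yl-mentor-group | wordfreq/WordFrequencyStatistics.py | most_match
-- ===== SOURCE A (Python) =====
-- def most_match(pkgs, labels):
--     """
--     pkg: [14, 12, 9, ...]   label: [1, 0, 0, 1, ...]
--     :param pkgs: {pkg1: {word1: cnt1, word2: cnt2, ...}}
--     :param labels: {label1, {word1: cnt1, ...}},
--     :return:
--     """
--     # 找出包的最近似类别
--     res = {}
--     for pkg, word_cnt1 in pkgs.items():
--         max_match_cnt = 0
--         for label, word_cnt2 in labels.items():
--             match_cnt = 0
--             for word, cnt in word_cnt1.items():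
--                 if word in word_cnt2:
--                     match_cnt += cnt
--             if match_cnt > max_match_cnt:
--                 res[pkg] = label
--                 max_match_cnt = match_cnt
--     return res
-- ===== SOURCE B (Python) =====
-- def most_match(pkgs, labels):
--     # Inverted index word -> label positions; one pass per pkg accumulates
--     # per-label overlap counts, then argmax in label order.
--     label_names = list(labels)
--     index = {}
--     for i, (label, word_cnt2) in enumerate(labels.items()):
--         for word in word_cnt2:
--             index.setdefault(word, []).append(i)
--     res = {}
--     for pkg, word_cnt1 in pkgs.items():
--         counts = [0] * len(label_names)
--         for word, cnt in word_cnt1.items():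
--             for i in index.get(word, []):
--                 counts[i] += cnt
--         best_i = None
--         best = 0
--         for i, v in enumerate(counts):
--             if v > best:
--                 best_i = i
--                 best = v
--         if best_i is not None:
--             res[pkg] = label_names[best_i]
--     return res
-- ===== Notes on version B (the rewrite author's own statement) =====
-- stated objective: faster
-- what changed: Replaces the per-package scan over every label's whole word dict by an inverted index word->label positions built once; each package then accumulates per-label overlap counts in one pass over its words and takes the argmax in label order.
import Mathlib
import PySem

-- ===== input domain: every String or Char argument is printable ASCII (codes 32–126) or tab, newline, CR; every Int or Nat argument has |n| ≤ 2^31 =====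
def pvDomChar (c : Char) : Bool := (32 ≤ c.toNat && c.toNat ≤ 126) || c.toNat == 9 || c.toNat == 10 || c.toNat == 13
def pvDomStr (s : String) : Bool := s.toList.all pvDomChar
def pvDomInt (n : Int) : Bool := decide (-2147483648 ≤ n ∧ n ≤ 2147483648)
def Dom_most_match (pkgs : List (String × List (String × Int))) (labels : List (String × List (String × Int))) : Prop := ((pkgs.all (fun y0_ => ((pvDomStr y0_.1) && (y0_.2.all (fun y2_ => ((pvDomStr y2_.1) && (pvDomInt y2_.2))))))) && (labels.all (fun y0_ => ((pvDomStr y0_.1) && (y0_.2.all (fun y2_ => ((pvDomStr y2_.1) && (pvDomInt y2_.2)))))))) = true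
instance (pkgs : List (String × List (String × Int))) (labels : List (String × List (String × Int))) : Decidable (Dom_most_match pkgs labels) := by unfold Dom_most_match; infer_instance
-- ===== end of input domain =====

-- B replaces A's per-package scan over every label's whole word dict by an inverted index
-- word → label positions built once, then a per-package accumulation pass and an argmax
-- in label order (objective: faster; same return value).

-- ===== PORT A =====
-- inner loop of A: match_cnt = sum of cnt over words of wc1 present in wc2
def pvMatchCnt (wc1 wc2 : List (String × Int)) : Int :=
  wc1.foldl (fun m p => if wc2.any (fun q => q.1 == p.1) then m + p.2 else m) 0

def most_match (pkgs : List (String × List (String × Int))) (labels : List (String × List (String × Int))) : List (String × String) :=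
  (pkgs.foldl
    (fun (res : PySem.Dict String String) p =>
      (labels.foldl
        (fun (st : PySem.Dict String String × Int) q =>
          let mc := pvMatchCnt p.2 q.2
          if mc > st.2 then (st.1.insert p.1 q.1, mc) else st)
        (res, 0)).1)
    PySem.Dict.empty).items

-- ===== PORT B =====
-- index.setdefault(word, []).append(i)  =  Dict.modify word [] (· ++ [i])
def pvIndex (labels : List (String × List (String × Int))) : PySem.Dict String (List Int) :=
  (PySem.List.enumerate labels).foldl
    (fun idx ip => ip.2.2.foldl (fun idx q => idx.modify q.1 [] (· ++ [ip.1])) idx)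
    PySem.Dict.empty

-- counts[i] += cnt  (indices produced by enumerate, hence nonnegative and in range)
def pvCounts (index : PySem.Dict String (List Int)) (n : Nat) (wc1 : List (String × Int)) : List Int :=
  wc1.foldl
    (fun counts p => (index.getD p.1 []).foldl (fun counts i => counts.modify i.toNat (· + p.2)) counts)
    (List.replicate n 0)

-- best_i = None; best = 0; for i, v in enumerate(counts): if v > best: …
def pvArgmax (counts : List Int) : Option Int × Int :=
  (PySem.List.enumerate counts).foldl
    (fun st iv => if iv.2 > st.2 then (some iv.1, iv.2) else st)
    (none, 0)

def most_match_alt (pkgs : List (String × List (String × Int))) (labels : List (String × List (String × Int))) : List (String × String) :=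
  let labelNames := labels.map (fun q => q.1)
  let index := pvIndex labels
  (pkgs.foldl
    (fun (res : PySem.Dict String String) p =>
      match (pvArgmax (pvCounts index labelNames.length p.2)).1 with
      | some i => res.insert p.1 (PySem.List.pyGetD labelNames i "")
      | none => res)
    PySem.Dict.empty).items

-- ===== PRECONDITION & SPEC =====
-- Pre_ excludes association lists with duplicate keys (among pkg names, label names, or inside
-- any word dict): those do not denote a Python dict faithfully (dict construction collapses
-- duplicates, last value wins), so both the ports' reading and A's-vs-B's reading of them are
-- accidental representation artefacts.
def Pre_most_match (pkgs : List (String × List (String × Int))) (labels : List (String × List (String × Int))) : Prop :=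
  (pkgs.map (fun p => p.1)).Nodup ∧ (labels.map (fun q => q.1)).Nodup ∧
  (∀ p ∈ pkgs, (p.2.map (fun r => r.1)).Nodup) ∧ (∀ q ∈ labels, (q.2.map (fun r => r.1)).Nodup)
instance (pkgs : List (String × List (String × Int))) (labels : List (String × List (String × Int))) : Decidable (Pre_most_match pkgs labels) := by unfold Pre_most_match; infer_instance

def pvWitness_most_match : (List (String × List (String × Int))) × (List (String × List (String × Int))) :=
  ([("p", [("w", 1)])], [("l", [("w", 1)])])

def Spec_most_match (pkgs : List (String × List (String × Int))) (labels : List (String × List (String × Int))) (out : List (String × String)) : Prop := out = most_match_alt pkgs labels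
instance (pkgs : List (String × List (String × Int))) (labels : List (String × List (String × Int))) (out : List (String × String)) : Decidable (Spec_most_match pkgs labels out) := by unfold Spec_most_match; infer_instance

-- ===== CLAIM (what is proved, stated in full; the proofs are below) =====
def Claim_equal_most_match : Prop := ∀ (pkgs : List (String × List (String × Int))) (labels : List (String × List (String × Int))), Dom_most_match pkgs labels → Pre_most_match pkgs labels → Spec_most_match pkgs labels (most_match pkgs labels)

-- ===== LEMMAS AND PROOFS =====

-- A's selection over the labels, abstracted: last strict improvement over threshold m
def pvSel (wc1 : List (String × Int)) (labels : List (String × List (String × Int))) (m : Int) : Option String × Int :=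
  labels.foldl (fun st q => if pvMatchCnt wc1 q.2 > st.2 then (some q.1, pvMatchCnt wc1 q.2) else st) (none, m)

theorem pvSel_or (wc1 : List (String × Int)) (labels : List (String × List (String × Int))) (o : Option String) (m : Int) :
    labels.foldl (fun st q => if pvMatchCnt wc1 q.2 > st.2 then (some q.1, pvMatchCnt wc1 q.2) else st) (o, m)
      = ((pvSel wc1 labels m).1.or o, (pvSel wc1 labels m).2) := by
  induction labels generalizing o m with
  | nil => simp [pvSel]
  | cons q rest ih =>
    simp only [pvSel, List.foldl_cons]
    by_cases h : pvMatchCnt wc1 q.2 > m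
    · simp only [if_pos h]
      rw [ih (some q.1) (pvMatchCnt wc1 q.2)]
      simp [pvSel]
    · simp only [if_neg h]
      exact ih o m

theorem pvA_inner (wc1 : List (String × Int)) (labels : List (String × List (String × Int)))
    (pkg : String) (res : PySem.Dict String String) (m : Int) :
    labels.foldl
        (fun (st : PySem.Dict String String × Int) q =>
          if pvMatchCnt wc1 q.2 > st.2 then (st.1.insert pkg q.1, pvMatchCnt wc1 q.2) else st)
        (res, m)
      = ((match (pvSel wc1 labels m).1 with
          | none => res
          | some l => res.insert pkg l), (pvSel wc1 labels m).2) := by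
  induction labels generalizing res m with
  | nil => simp [pvSel]
  | cons q rest ih =>
    simp only [pvSel, List.foldl_cons]
    by_cases h : pvMatchCnt wc1 q.2 > m
    · simp only [if_pos h]
      rw [ih (res.insert pkg q.1) (pvMatchCnt wc1 q.2),
          pvSel_or wc1 rest (some q.1) (pvMatchCnt wc1 q.2)]
      cases hsel : (pvSel wc1 rest (pvMatchCnt wc1 q.2)).1 with
      | none => simp [pvSel]
      | some l => simp [pvSel, PySem.Dict.insert_insert_self]
    · simp only [if_neg h]
      exact ih res m

theorem pv_enumerate_map {α β : Type} (f : α → β) (l : List α) (s : Int) :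
    PySem.List.enumerate (l.map f) s = (PySem.List.enumerate l s).map (fun p => (p.1, f p.2)) := by
  induction l generalizing s with
  | nil => rfl
  | cons x xs ih => simp [PySem.List.enumerate_cons, ih]


-- count of an element in a concatenation of blocks is the sum of the per-block counts
theorem pv_count_flatMap {α β : Type} [BEq α] [LawfulBEq α] (g : β → List α) (l : List β) (c : α) :
    (l.flatMap g).count c = (l.map (fun x => (g x).count c)).sum := by
  induction l with
  | nil => rfl
  | cons x xs ih => simp [List.flatMap_cons, List.count_append, ih]

-- characterisation of the inverted index: the entry for w lists, in order, one copy of the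
-- position i for every occurrence of key w in label i's word dict
theorem pvIndex_aux (w : String) (l : List (Int × (String × List (String × Int)))) (d : PySem.Dict String (List Int)) :
    (l.foldl (fun idx ip => ip.2.2.foldl (fun idx q => idx.modify q.1 [] (· ++ [ip.1])) idx) d).getD w []
      = d.getD w [] ++ l.flatMap (fun ip => (ip.2.2.filter (fun q => q.1 == w)).map (fun _ => ip.1)) := by
  induction l generalizing d with
  | nil => simp
  | cons ip rest ih =>
    rw [List.foldl_cons, ih]
    have hinner : (ip.2.2.foldl (fun idx q => idx.modify q.1 [] (· ++ [ip.1])) d).getD w []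
        = d.getD w [] ++ (ip.2.2.filter (fun q => q.1 == w)).map (fun _ => ip.1) := by
      have key := PySem.Dict.getD_foldl_modify_append
        (l := ip.2.2.map (fun q => (q.1, ip.1))) (d := d) (c := w)
      rw [List.foldl_map, List.filter_map, List.map_map] at key
      exact key
    rw [hinner, List.flatMap_cons, List.append_assoc]

theorem pvIndex_getD (labels : List (String × List (String × Int))) (w : String) :
    (pvIndex labels).getD w []
      = (PySem.List.enumerate labels).flatMap (fun ip => (ip.2.2.filter (fun q => q.1 == w)).map (fun _ => ip.1)) := by
  rw [pvIndex, pvIndex_aux]; rfl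

-- picking the jn-th block out of a sum indexed by enumerate
theorem pv_enum_pick {α : Type} (g : α → Nat) (l : List α) (s jn : Nat) (h : jn < l.length) :
    ((PySem.List.enumerate l (s : Int)).map (fun p => if p.1.toNat = s + jn then g p.2 else 0)).sum
      = g l[jn] := by
  induction l generalizing s jn with
  | nil => simp at h
  | cons x xs ih =>
    rw [PySem.List.enumerate_cons, List.map_cons, List.sum_cons]
    cases jn with
    | zero =>
      rw [if_pos (show ((s : Int)).toNat = s + 0 by omega)]
      have hrest : ((PySem.List.enumerate xs ((s : Int) + 1)).map
          (fun p => if p.1.toNat = s + 0 then g p.2 else 0)).sum = 0 := by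
        apply List.sum_eq_zero
        intro y hy
        obtain ⟨p, hp, rfl⟩ := List.mem_map.mp hy
        obtain ⟨k, hk, rfl⟩ := (PySem.List.mem_enumerate_iff _ _ _).mp hp
        rw [if_neg (by omega)]
      rw [hrest]
      simp
    | succ jn' =>
      rw [if_neg (by omega)]
      have h2 : (s : Int) + 1 = ((s + 1 : Nat) : Int) := by push_cast; ring
      have h3 : ∀ t : Nat, (t = s + (jn' + 1)) = (t = (s + 1) + jn') := by
        intro t; apply propext; omega
      simp only [h3, h2]
      rw [ih (s + 1) jn' (by simpa using h)]
      simp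

-- one pass of "counts[i] += c" over a list of positions, observed at position jn
theorem pv_inner_modify (is : List Int) (cs : List Int) (c : Int) (jn : Nat) :
    (is.foldl (fun cs i => cs.modify i.toNat (· + c)) cs)[jn]?
      = cs[jn]?.map (fun v => v + c * ((is.map Int.toNat).count jn : Int)) := by
  induction is generalizing cs with
  | nil => cases h : cs[jn]? <;> simp [h]
  | cons i rest ih =>
    rw [List.foldl_cons, ih, List.getElem?_modify]
    cases h : cs[jn]? with
    | none => simp
    | some v =>
      by_cases hij : i.toNat = jn
      · simp [hij]
        ring
      · simp [hij]

-- the whole per-package accumulation pass, observed at position jn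
theorem pv_outer_counts (idx : PySem.Dict String (List Int)) (wc1 : List (String × Int)) (cs : List Int) (jn : Nat) :
    (wc1.foldl (fun counts p => ((idx.getD p.1 []).foldl (fun counts i => counts.modify i.toNat (· + p.2)) counts)) cs)[jn]?
      = cs[jn]?.map (fun v => v + (wc1.map (fun p => p.2 * (((idx.getD p.1 []).map Int.toNat).count jn : Int))).sum) := by
  induction wc1 generalizing cs with
  | nil => cases h : cs[jn]? <;> simp [h]
  | cons p rest ih =>
    rw [List.foldl_cons, ih, pv_inner_modify]
    cases h : cs[jn]? with
    | none => simp
    | some v =>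
      simp
      ring

-- a Nodup-keys word dict contains each key at most once
theorem pv_countP_nodup (wc2 : List (String × Int)) (hnd : (wc2.map (fun r => r.1)).Nodup) (w : String) :
    (wc2.countP (fun q => q.1 == w) : Nat) = if wc2.any (fun q => q.1 == w) then 1 else 0 := by
  have hc : wc2.countP (fun q => q.1 == w) = (wc2.map (fun r => r.1)).count w := by
    rw [List.count_eq_countP, List.countP_map]
    rfl
  have hle := List.nodup_iff_count_le_one.mp hnd w
  by_cases hmem : w ∈ wc2.map (fun r => r.1)
  · have hpos := List.count_pos_iff.mpr hmem
    have hany : wc2.any (fun q => q.1 == w) = true := by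
      simp only [List.any_eq_true]
      obtain ⟨q, hq, rfl⟩ := List.mem_map.mp hmem
      exact ⟨q, hq, by simp⟩
    rw [hc, hany, if_pos rfl]; omega
  · have hany : wc2.any (fun q => q.1 == w) = false := by
      simp only [List.any_eq_false]
      intro q hq
      simp only [beq_iff_eq]
      intro hqw
      exact hmem (List.mem_map.mpr ⟨q, hq, hqw⟩)
    rw [hc, hany, if_neg (by simp), List.count_eq_zero.mpr hmem]

-- A's inner loop as a sum
theorem pvMatchCnt_sum (wc1 wc2 : List (String × Int)) :
    pvMatchCnt wc1 wc2 = (wc1.map (fun p => if wc2.any (fun q => q.1 == p.1) then p.2 else 0)).sum := by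
  rw [pvMatchCnt,
    show (fun (m : Int) (p : String × Int) => if wc2.any (fun q => q.1 == p.1) then m + p.2 else m)
      = (fun m p => m + if wc2.any (fun q => q.1 == p.1) then p.2 else 0) from by
        funext m p; split <;> simp,
    PySem.List.foldl_add, zero_add]

-- the accumulated counts list is exactly the list of A's per-label match counts
theorem pvCounts_eq (labels : List (String × List (String × Int)))
    (hnd : ∀ q ∈ labels, (q.2.map (fun r => r.1)).Nodup) (wc1 : List (String × Int)) :
    pvCounts (pvIndex labels) labels.length wc1 = labels.map (fun q => pvMatchCnt wc1 q.2) := by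
  apply List.ext_getElem?
  intro jn
  rw [pvCounts, pv_outer_counts]
  by_cases hjn : jn < labels.length
  · rw [List.getElem?_replicate, if_pos hjn, List.getElem?_eq_getElem (by simpa using hjn)]
    simp only [Option.map_some, List.getElem_map, zero_add]
    congr 1
    rw [pvMatchCnt_sum]
    congr 1
    apply List.map_congr_left
    intro p _
    have hblk : ∀ ip : Int × (String × List (String × Int)),
        (((ip.2.2.filter (fun q => q.1 == p.1)).map (fun _ => ip.1)).map Int.toNat).count jn
          = if ip.1.toNat = jn then (ip.2.2.filter (fun q => q.1 == p.1)).length else 0 := by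
      intro ip
      rw [List.map_map, show ((fun i : Int => i.toNat) ∘ fun _ => ip.1) = (fun _ => ip.1.toNat) from rfl,
        List.map_const', List.count_replicate]
      simp
    have hcount : (((pvIndex labels).getD p.1 []).map Int.toNat).count jn
        = labels[jn].2.countP (fun q => q.1 == p.1) := by
      rw [pvIndex_getD, List.map_flatMap, pv_count_flatMap]
      have hpick := pv_enum_pick (fun q => (q.2.filter (fun r => r.1 == p.1)).length) labels 0 jn hjn
      simp only [Nat.cast_zero, Nat.zero_add] at hpick
      rw [List.map_congr_left (fun ip _ => hblk ip), hpick, List.countP_eq_length_filter]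
    rw [hcount, pv_countP_nodup labels[jn].2 (hnd _ (List.getElem_mem hjn)) p.1]
    split <;> simp
  · have h1 : (List.replicate labels.length (0 : Int))[jn]? = none := by
      rw [List.getElem?_eq_none_iff]; simpa using Nat.le_of_not_lt hjn
    have h2 : (labels.map (fun q => pvMatchCnt wc1 q.2))[jn]? = none := by
      rw [List.getElem?_eq_none_iff]; simpa using Nat.le_of_not_lt hjn
    rw [h1, h2]; rfl

-- paired argmax loops: indices on the left, label names on the right
theorem pv_pair (f : (String × List (String × Int)) → Int) (names : List String)
    (l : List (String × List (String × Int))) (s : Int) (o1 : Option Int) (m : Int)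
    (h : ∀ p ∈ PySem.List.enumerate l s, PySem.List.pyGetD names p.1 "" = p.2.1) :
    l.foldl (fun st q => if f q > st.2 then (some q.1, f q) else st)
        (o1.map (fun i => PySem.List.pyGetD names i ""), m)
      = (((PySem.List.enumerate l s).foldl (fun st iq => if f iq.2 > st.2 then (some iq.1, f iq.2) else st) (o1, m)).1.map
          (fun i => PySem.List.pyGetD names i ""),
         ((PySem.List.enumerate l s).foldl (fun st iq => if f iq.2 > st.2 then (some iq.1, f iq.2) else st) (o1, m)).2) := by
  induction l generalizing s o1 m with
  | nil => simp
  | cons q rest ih =>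
    rw [PySem.List.enumerate_cons]
    simp only [List.foldl_cons]
    by_cases hc : f q > m
    · simp only [if_pos hc]
      have hhead : PySem.List.pyGetD names s "" = q.1 :=
        h (s, q) (by rw [PySem.List.enumerate_cons]; exact List.mem_cons_self)
      have := ih (s + 1) (some s) (f q)
        (fun p hp => h p (by rw [PySem.List.enumerate_cons]; exact List.mem_cons_of_mem _ hp))
      rw [Option.map_some, hhead] at this
      exact this
    · simp only [if_neg hc]
      exact ih (s + 1) o1 m
        (fun p hp => h p (by rw [PySem.List.enumerate_cons]; exact List.mem_cons_of_mem _ hp))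

-- pushing a renaming through the final match on the best index
theorem pv_match_map (g : Int → String) (o : Option Int) (res : PySem.Dict String String) (pkg : String) :
    (match o.map g with | none => res | some l => res.insert pkg l)
      = (match o with | some i => res.insert pkg (g i) | none => res) := by
  cases o <;> rfl

-- per-package step of A equals per-package step of B
theorem pv_step_eq (labels : List (String × List (String × Int)))
    (hnd : ∀ q ∈ labels, (q.2.map (fun r => r.1)).Nodup)
    (res : PySem.Dict String String) (p : String × List (String × Int)) :
    (labels.foldl (fun (st : PySem.Dict String String × Int) q =>
        if pvMatchCnt p.2 q.2 > st.2 then (st.1.insert p.1 q.1, pvMatchCnt p.2 q.2) else st) (res, 0)).1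
    = (match (pvArgmax (pvCounts (pvIndex labels) (labels.map (fun q => q.1)).length p.2)).1 with
       | some i => res.insert p.1 (PySem.List.pyGetD (labels.map (fun q => q.1)) i "")
       | none => res) := by
  have hmem : ∀ q ∈ PySem.List.enumerate labels 0,
      PySem.List.pyGetD (labels.map (fun q => q.1)) q.1 "" = q.2.1 := by
    intro q hq
    obtain ⟨k, hk, rfl⟩ := (PySem.List.mem_enumerate_iff _ _ _).mp hq
    rw [zero_add, PySem.List.pyGetD_natCast]
    rw [List.getD_eq_getElem?_getD, List.getElem?_map, List.getElem?_eq_getElem hk]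
    rfl
  have hp := pv_pair (fun q => pvMatchCnt p.2 q.2) (labels.map (fun q => q.1)) labels 0 none 0 hmem
  simp only [Option.map_none] at hp
  rw [pvA_inner, List.length_map, pvCounts_eq labels hnd p.2, pvArgmax, pv_enumerate_map,
    List.foldl_map]
  simp only [pvSel]
  rw [hp]
  exact pv_match_map _ _ _ _

-- ===== VERDICT (by name: the statement is the Claim_ definition above) =====
theorem most_match_spec : Claim_equal_most_match := by
  intro pkgs labels _ hpre
  obtain ⟨_, _, _, h4⟩ := hpre
  unfold Spec_most_match most_match most_match_alt
  apply congrArg PySem.Dict.items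
  apply PySem.List.foldl_congr_mem
  intro res x _
  show (labels.foldl (fun (st : PySem.Dict String String × Int) q =>
      if pvMatchCnt x.2 q.2 > st.2 then (st.1.insert x.1 q.1, pvMatchCnt x.2 q.2) else st) (res, 0)).1
    = (match (pvArgmax (pvCounts (pvIndex labels) (labels.map (fun q => q.1)).length x.2)).1 with
       | some i => res.insert x.1 (PySem.List.pyGetD (labels.map (fun q => q.1)) i "")
       | none => res)
  exact pv_step_eq labels h4 res x
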